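-- pv_equiv track=rewrite | github.com/Brosax/D_RD | vendor/plugins/code_analyzer/scanner/file_parser.py | _remove_single_line_comments
-- ===== SOURCE A (Python) =====
-- def _remove_single_line_comments(content: str) -> str:
--     """Remove // style comments."""
--     lines = []
--     in_string = False
--     for line in content.split("\n"):
--         result = ""
--         i = 0
--         while i < len(line):
--             char = line[i]
--             if char == '"' and (i == 0 or line[i-1] != '\\'):
--                 in_string = not in_string
--                 result += char
--             elif not in_string and i + 1 < len(line) and line[i:i+2] == "//":
--                 break
--             else:
--                 result += char
--             i += 1
--         lines.append(result)
--     return "\n".join(lines)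
-- ===== SOURCE B (Python) =====
-- def _remove_single_line_comments(content: str) -> str:
--     """Remove // style comments (single flat streaming pass, no split/join of lines)."""
--     out = []
--     in_string = False
--     in_comment = False
--     pending_slash = False  # a '/' seen outside a string whose fate depends on the next char
--     prev = None
--     for ch in content:
--         if ch == "\n":
--             if pending_slash:
--                 out.append("/")
--                 pending_slash = False
--             in_comment = False
--             out.append(ch)
--         elif in_comment:
--             pass
--         elif ch == '"' and prev != "\\":
--             if pending_slash:
--                 out.append("/")
--                 pending_slash = False
--             in_string = not in_string
--             out.append(ch)
--         elif not in_string and ch == "/":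
--             if pending_slash:
--                 in_comment = True
--                 pending_slash = False
--             else:
--                 pending_slash = True
--         else:
--             if pending_slash:
--                 out.append("/")
--                 pending_slash = False
--             out.append(ch)
--         prev = ch
--     if pending_slash:
--         out.append("/")
--     return "".join(out)
-- ===== Notes on version B (the rewrite author's own statement) =====
-- stated objective: alternative
-- what changed: Replaced the split-into-lines / per-line index-and-lookahead while-loop / join architecture by a single flat streaming pass over the characters with explicit in_comment and pending-slash state (one-char lookbehind instead of slicing lookahead).
import Mathlib
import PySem

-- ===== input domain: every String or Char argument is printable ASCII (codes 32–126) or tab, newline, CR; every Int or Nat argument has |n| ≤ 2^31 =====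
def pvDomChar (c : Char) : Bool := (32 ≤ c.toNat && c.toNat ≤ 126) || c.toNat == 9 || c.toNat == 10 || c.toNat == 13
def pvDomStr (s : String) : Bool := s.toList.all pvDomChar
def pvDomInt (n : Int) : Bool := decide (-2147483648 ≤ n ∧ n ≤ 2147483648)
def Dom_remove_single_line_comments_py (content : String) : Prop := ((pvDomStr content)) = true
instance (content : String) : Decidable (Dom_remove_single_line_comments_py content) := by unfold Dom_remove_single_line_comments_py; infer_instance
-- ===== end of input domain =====

-- B replaces A's split-into-lines / per-line index loop / join architecture by one flat
-- streaming pass with explicit comment and pending-slash state (alternative decomposition,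
-- same O(n) cost).

-- ===== PORT A =====
-- the inner `while i < len(line)` loop of A; returns (result, in_string)
def pvALine (cs : List Char) (i : Nat) (inS : Bool) (res : List Char) : List Char × Bool :=
  if h : i < cs.length then
    let c := cs[i]
    if c = '"' ∧ (i = 0 ∨ cs[i-1]? ≠ some '\\') then
      pvALine cs (i+1) (!inS) (res ++ [c])
    else if inS = false ∧ i + 1 < cs.length ∧
        PySem.List.slice cs (some (i : Int)) (some ((i : Int) + 2)) = ['/', '/'] then
      (res, inS)                                   -- break
    else
      pvALine cs (i+1) inS (res ++ [c])
  else (res, inS)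
  termination_by cs.length - i

def remove_single_line_comments_py (content : String) : String :=
  let lines := PySem.Chars.splitOn content.toList ['\n']   -- content.split("\n")
  let st := lines.foldl (fun (st : List (List Char) × Bool) line =>
      let p := pvALine line 0 st.2 []
      (st.1 ++ [p.1], p.2)) ([], false)
  String.mk (PySem.Chars.join ['\n'] st.1)                 -- "\n".join(lines)

-- ===== PORT B =====
-- state: (out, in_string, in_comment, pending_slash, prev)
def pvBStep (st : List Char × Bool × Bool × Bool × Option Char) (ch : Char) :
    List Char × Bool × Bool × Bool × Option Char :=
  let (out, inS, inC, pend, prev) := st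
  if ch = '\n' then
    ((out ++ (if pend then ['/'] else [])) ++ [ch], inS, false, false, some ch)
  else if inC then
    (out, inS, inC, pend, some ch)
  else if ch = '"' ∧ prev ≠ some '\\' then
    ((out ++ (if pend then ['/'] else [])) ++ [ch], !inS, inC, false, some ch)
  else if inS = false ∧ ch = '/' then
    if pend then (out, inS, true, false, some ch)
    else (out, inS, inC, true, some ch)
  else
    ((out ++ (if pend then ['/'] else [])) ++ [ch], inS, inC, false, some ch)

def remove_single_line_comments_py_alt (content : String) : String :=
  let st := content.toList.foldl pvBStep ([], false, false, false, none)
  String.mk (st.1 ++ (if st.2.2.2.1 then ['/'] else []))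

-- ===== PRECONDITION & SPEC =====
def Spec_remove_single_line_comments_py (content : String) (out : String) : Prop := out = remove_single_line_comments_py_alt content
instance (content : String) (out : String) : Decidable (Spec_remove_single_line_comments_py content out) := by unfold Spec_remove_single_line_comments_py; infer_instance

-- ===== CLAIM (what is proved, stated in full; the proofs are below) =====
def Claim_equal_remove_single_line_comments_py : Prop := ∀ (content : String), Dom_remove_single_line_comments_py content → Spec_remove_single_line_comments_py content (remove_single_line_comments_py content)

-- ===== LEMMAS AND PROOFS =====

-- A's inner loop as a structural recursion over the line; pb = "previous char was a backslash"
def pvProcA (s : Bool) (pb : Bool) : List Char → List Char × Bool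
  | [] => ([], s)
  | c :: rest =>
    if c = '"' ∧ pb = false then
      (c :: (pvProcA (!s) false rest).1, (pvProcA (!s) false rest).2)
    else if s = false ∧ c = '/' ∧ rest.head? = some '/' then ([], s)
    else
      (c :: (pvProcA s (decide (c = '\\')) rest).1, (pvProcA s (decide (c = '\\')) rest).2)

-- the common flat-pass reference: A's whole computation over the raw character stream
def pvRunA (s : Bool) (pb : Bool) : List Char → List Char
  | [] => []
  | c :: rest =>
    if c = '\n' then '\n' :: pvRunA s false rest
    else if c = '"' ∧ pb = false then c :: pvRunA (!s) false rest
    else if s = false ∧ c = '/' ∧ rest.head? = some '/' then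
      pvRunA s false (rest.dropWhile (· ≠ '\n'))
    else c :: pvRunA s (decide (c = '\\')) rest
  termination_by cs => cs.length
  decreasing_by
  · simp
  · simp
  · exact Nat.lt_succ_of_le (List.length_dropWhile_le _ _)
  · simp

-- split on '\n' as a structural recursion
def pvSplitNL : List Char → List (List Char)
  | [] => [[]]
  | c :: r =>
    if c = '\n' then [] :: pvSplitNL r
    else
      match pvSplitNL r with
      | [] => [[c]]
      | h :: t => (c :: h) :: t

def pvConsH (x : List Char) : List (List Char) → List (List Char)
  | [] => [x]
  | h :: t => (x ++ h) :: t

theorem pvSplitNL_ne_nil (l : List Char) : pvSplitNL l ≠ [] := by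
  cases l with
  | nil => simp [pvSplitNL]
  | cons c r =>
    simp only [pvSplitNL]
    split
    · simp
    · split <;> simp

theorem pvGo_eq (l : List Char) : ∀ (fuel : Nat) (cur : List Char) (acc : List (List Char)),
    l.length < fuel →
    PySem.Chars.splitOn.go ['\n'] fuel l cur acc = acc.reverse ++ pvConsH cur.reverse (pvSplitNL l) := by
  induction l with
  | nil =>
    intro fuel cur acc h
    match fuel, h with
    | fuel + 1, _ =>
      rw [PySem.Chars.splitOn.go.eq_def]
      simp [pvSplitNL, pvConsH]
  | cons c r ih =>
    intro fuel cur acc h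
    match fuel, h with
    | fuel + 1, h =>
      rw [PySem.Chars.splitOn.go.eq_def]
      simp only []
      by_cases hc : c = '\n'
      · subst hc
        have hpre : List.isPrefixOf ['\n'] ('\n' :: r) = true := by
          simp [List.isPrefixOf]
        rw [if_pos hpre]
        have hd1 : List.drop (['\n'] : List Char).length ('\n' :: r) = r := rfl
        rw [hd1, ih fuel [] (cur.reverse :: acc) (by simpa using h)]
        rcases hsp : pvSplitNL r with _ | ⟨hd, tl⟩
        · exact absurd hsp (pvSplitNL_ne_nil r)
        · simp [pvSplitNL, pvConsH, hsp]
      · have hpre : List.isPrefixOf ['\n'] (c :: r) = false := by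
          simp only [List.isPrefixOf, Bool.and_eq_true, beq_iff_eq, List.isPrefixOf_nil_left,
            Bool.and_true, decide_eq_true_eq]
          simp only [Bool.eq_false_iff]
          intro hh
          simp only [beq_iff_eq] at hh
          exact hc hh.symm
        rw [if_neg (by simp [hpre])]
        rw [ih fuel (c :: cur) acc (by simpa using h)]
        rcases hsp : pvSplitNL r with _ | ⟨hd, tl⟩
        · exact absurd hsp (pvSplitNL_ne_nil r)
        · simp [pvSplitNL, pvConsH, hsp, hc]
  
theorem pvSplitOn_eq (cs : List Char) : PySem.Chars.splitOn cs ['\n'] = pvSplitNL cs := by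
  show PySem.Chars.splitOn.go ['\n'] (cs.length + 1) cs [] [] = _
  rw [pvGo_eq cs (cs.length + 1) [] [] (Nat.lt_succ_self _)]
  rcases hsp : pvSplitNL cs with _ | ⟨hd, tl⟩
  · exact absurd hsp (pvSplitNL_ne_nil cs)
  · simp [pvConsH]

-- the index loop computes pvProcA
theorem pvALine_eq (cs : List Char) : ∀ (i : Nat) (s : Bool) (res : List Char), i ≤ cs.length →
    pvALine cs i s res =
      (res ++ (pvProcA s (decide (i ≠ 0 ∧ cs[i-1]? = some '\\')) (cs.drop i)).1,
       (pvProcA s (decide (i ≠ 0 ∧ cs[i-1]? = some '\\')) (cs.drop i)).2) := by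
  have H : ∀ (n : Nat) (i : Nat) (s : Bool) (res : List Char), cs.length - i ≤ n → i ≤ cs.length →
      pvALine cs i s res =
        (res ++ (pvProcA s (decide (i ≠ 0 ∧ cs[i-1]? = some '\\')) (cs.drop i)).1,
         (pvProcA s (decide (i ≠ 0 ∧ cs[i-1]? = some '\\')) (cs.drop i)).2) := by
    intro n
    induction n with
    | zero =>
      intro i s res hn hi
      have : i = cs.length := by omega
      subst this
      rw [pvALine]
      simp [pvProcA]
    | succ n ih =>
      intro i s res hn hi
      by_cases h : i < cs.length
      · have hdrop : cs.drop i = cs[i] :: cs.drop (i+1) := (List.getElem_cons_drop h).symm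
        have hpb1 : (decide ((i+1) ≠ 0 ∧ cs[(i+1)-1]? = some '\\')) = decide (cs[i] = '\\') := by
          simp [List.getElem?_eq_getElem h]
        rw [pvALine, dif_pos h]
        by_cases hq : cs[i] = '"' ∧ (i = 0 ∨ cs[i-1]? ≠ some '\\')
        · rw [if_pos hq]
          rw [ih (i+1) (!s) (res ++ [cs[i]]) (by omega) (by omega)]
          rw [hdrop]
          have hcond : (cs[i] = '"' ∧ (decide (i ≠ 0 ∧ cs[i-1]? = some '\\')) = false) := by
            refine ⟨hq.1, ?_⟩
            simp only [decide_eq_false_iff_not]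
            rcases hq.2 with h0 | hne
            · intro hc; exact hc.1 h0
            · intro hc; exact hne hc.2
          have hpb2 : (decide (cs[i] = '\\')) = false := by
            simp only [decide_eq_false_iff_not]; rw [hq.1]; decide
          simp only [pvProcA, if_pos hcond, hpb1, hpb2]
          simp
        · rw [if_neg hq]
          have hqc : ¬ (cs[i] = '"' ∧ (decide (i ≠ 0 ∧ cs[i-1]? = some '\\')) = false) := by
            intro hc
            apply hq
            refine ⟨hc.1, ?_⟩
            have := hc.2
            simp only [decide_eq_false_iff_not] at this
            by_cases h0 : i = 0
            · exact Or.inl h0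
            · right; intro heq; exact this ⟨h0, heq⟩
          by_cases hcm : s = false ∧ i + 1 < cs.length ∧
              PySem.List.slice cs (some (i : Int)) (some ((i : Int) + 2)) = ['/', '/']
          · rw [if_pos hcm]
            -- the break: show pvProcA takes its break branch too
            obtain ⟨hs, hlt, hsl⟩ := hcm
            have hsl' : (cs.drop i).take 2 = ['/', '/'] := by
              have : ((i : Int) + 2) = ((i + 2 : Nat) : Int) := by push_cast; ring
              rw [this, PySem.List.slice_natCast] at hsl
              simpa using hsl
            have hdrop1 : cs.drop (i+1) = cs[i+1] :: cs.drop (i+2) := (List.getElem_cons_drop hlt).symm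
            rw [hdrop, hdrop1] at hsl'
            simp only [List.take_succ_cons, List.take_zero, List.cons.injEq, and_true] at hsl'
            have hcond2 : (s = false ∧ cs[i] = '/' ∧ (cs.drop (i+1)).head? = some '/') := by
              refine ⟨hs, hsl'.1, ?_⟩
              rw [hdrop1]; simp [hsl'.2]
            rw [hdrop]
            simp only [pvProcA, if_neg hqc, if_pos hcond2]
            simp
          · rw [if_neg hcm]
            rw [ih (i+1) s (res ++ [cs[i]]) (by omega) (by omega)]
            have hcm2 : ¬ (s = false ∧ cs[i] = '/' ∧ (cs.drop (i+1)).head? = some '/') := by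
              intro ⟨hs, hc, hh⟩
              apply hcm
              refine ⟨hs, ?_, ?_⟩
              · rcases hdr : cs.drop (i+1) with _ | ⟨d, rr⟩
                · rw [hdr] at hh; simp at hh
                · have := congrArg List.length hdr
                  simp at this
                  omega
              · have hlt : i + 1 < cs.length := by
                  rcases hdr : cs.drop (i+1) with _ | ⟨d, rr⟩
                  · rw [hdr] at hh; simp at hh
                  · have := congrArg List.length hdr
                    simp at this
                    omega
                have : ((i : Int) + 2) = ((i + 2 : Nat) : Int) := by push_cast; ring
                rw [this, PySem.List.slice_natCast]
                have hdrop1 : cs.drop (i+1) = cs[i+1] :: cs.drop (i+2) := (List.getElem_cons_drop hlt).symm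
                rw [hdrop1] at hh
                simp only [List.head?_cons, Option.some.injEq] at hh
                have h2 : (cs.drop i).take 2 = ['/', '/'] := by
                  rw [hdrop, hdrop1]
                  simp only [List.take_succ_cons, List.take_zero, List.cons.injEq, and_true]
                  exact ⟨hc, hh⟩
                simpa using h2
            rw [hdrop]
            simp only [pvProcA, if_neg hqc, if_neg hcm2, hpb1]
            simp
      · have : i = cs.length := by omega
        subst this
        rw [pvALine]
        simp [pvProcA]
  intro i s res hi
  exact H (cs.length - i) i s res le_rfl hi

-- A's for-loop over the lines
def pvLinesA (s : Bool) : List (List Char) → List (List Char)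
  | [] => []
  | l :: t => (pvProcA s false l).1 :: pvLinesA (pvProcA s false l).2 t

theorem pvFoldA_eq (lines : List (List Char)) : ∀ (acc : List (List Char)) (s : Bool),
    (lines.foldl (fun (st : List (List Char) × Bool) line =>
      let p := pvALine line 0 st.2 []
      (st.1 ++ [p.1], p.2)) (acc, s)).1 = acc ++ pvLinesA s lines := by
  induction lines with
  | nil => intro acc s; simp [pvLinesA]
  | cons l t ih =>
    intro acc s
    simp only [List.foldl_cons]
    rw [pvALine_eq l 0 s [] (Nat.zero_le _)]
    simp only [List.drop_zero, ne_eq, not_true_eq_false, false_and, decide_false, List.nil_append]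
    rw [ih]
    simp [pvLinesA]

theorem pvSplitNL_append (l : List Char) (r : List Char) (hl : '\n' ∉ l) :
    pvSplitNL (l ++ '\n' :: r) = l :: pvSplitNL r := by
  induction l with
  | nil => simp [pvSplitNL]
  | cons c l' ih =>
    have hc : c ≠ '\n' := by intro h; exact hl (h ▸ List.mem_cons_self)
    have hl' : '\n' ∉ l' := fun h => hl (List.mem_cons_of_mem _ h)
    simp only [List.cons_append, pvSplitNL, if_neg hc, ih hl']

theorem pvSplitNL_no_nl (l : List Char) (hl : '\n' ∉ l) : pvSplitNL l = [l] := by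
  induction l with
  | nil => simp [pvSplitNL]
  | cons c l' ih =>
    have hc : c ≠ '\n' := by intro h; exact hl (h ▸ List.mem_cons_self)
    have hl' : '\n' ∉ l' := fun h => hl (List.mem_cons_of_mem _ h)
    simp only [pvSplitNL, if_neg hc, ih hl']

theorem pvDropWhile_no (l : List Char) (h : '\n' ∉ l) :
    l.dropWhile (· ≠ '\n') = [] := by
  rw [List.dropWhile_eq_nil_iff]
  intro x hx
  simp only [ne_eq, decide_eq_true_eq]
  intro he; exact h (he ▸ hx)

theorem pvDropWhile_append (l r : List Char) (h : '\n' ∉ l) :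
    (l ++ '\n' :: r).dropWhile (· ≠ '\n') = '\n' :: r := by
  rw [List.dropWhile_append, pvDropWhile_no l h]
  simp [List.dropWhile_cons]

-- the last line: pvRunA on a newline-free list is pvProcA's result
theorem pvRunA_no_nl (l : List Char) : ∀ (s pb : Bool), '\n' ∉ l →
    pvRunA s pb l = (pvProcA s pb l).1 := by
  induction l with
  | nil => intro s pb _; simp [pvRunA, pvProcA]
  | cons c l' ih =>
    intro s pb hl
    have hc : c ≠ '\n' := by intro h; exact hl (h ▸ List.mem_cons_self)
    have hl' : '\n' ∉ l' := fun h => hl (List.mem_cons_of_mem _ h)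
    rw [pvRunA, pvProcA, if_neg hc]
    by_cases hq : c = '"' ∧ pb = false
    · rw [if_pos hq, if_pos hq, ih _ _ hl']
    · rw [if_neg hq, if_neg hq]
      by_cases hcm : s = false ∧ c = '/' ∧ l'.head? = some '/'
      · rw [if_pos hcm, if_pos hcm, pvDropWhile_no l' hl', pvRunA]
      · rw [if_neg hcm, if_neg hcm, ih _ _ hl']

-- a full line followed by a newline
theorem pvRunA_line (l : List Char) : ∀ (s pb : Bool) (r : List Char), '\n' ∉ l →
    pvRunA s pb (l ++ '\n' :: r) =
      (pvProcA s pb l).1 ++ '\n' :: pvRunA (pvProcA s pb l).2 false r := by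
  induction l with
  | nil => intro s pb r _; simp [pvRunA, pvProcA]
  | cons c l' ih =>
    intro s pb r hl
    have hc : c ≠ '\n' := by intro h; exact hl (h ▸ List.mem_cons_self)
    have hl' : '\n' ∉ l' := fun h => hl (List.mem_cons_of_mem _ h)
    rw [List.cons_append, pvRunA, pvProcA, if_neg hc]
    by_cases hq : c = '"' ∧ pb = false
    · rw [if_pos hq, if_pos hq, ih _ _ _ hl']
      simp
    · rw [if_neg hq, if_neg hq]
      have hhd : ((l' ++ '\n' :: r).head? = some '/') ↔ (l'.head? = some '/') := by
        cases l' with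
        | nil => simp
        | cons d t => simp
      by_cases hcm : s = false ∧ c = '/' ∧ l'.head? = some '/'
      · have hcm' : s = false ∧ c = '/' ∧ (l' ++ '\n' :: r).head? = some '/' :=
          ⟨hcm.1, hcm.2.1, hhd.mpr hcm.2.2⟩
        rw [if_pos hcm', if_pos hcm, pvDropWhile_append l' r hl', pvRunA]
        rcases hcm with ⟨hs, _, _⟩
        subst hs
        simp
      · have hcm' : ¬ (s = false ∧ c = '/' ∧ (l' ++ '\n' :: r).head? = some '/') := by
          intro h; exact hcm ⟨h.1, h.2.1, hhd.mp h.2.2⟩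
        rw [if_neg hcm', if_neg hcm, ih _ _ _ hl']
        simp

-- A's whole pipeline equals the flat reference pass
theorem pvJoin_linesA (cs : List Char) : ∀ (s : Bool),
    PySem.Chars.join ['\n'] (pvLinesA s (pvSplitNL cs)) = pvRunA s false cs := by
  have H : ∀ (n : Nat) (cs : List Char), cs.length ≤ n → ∀ (s : Bool),
      PySem.Chars.join ['\n'] (pvLinesA s (pvSplitNL cs)) = pvRunA s false cs := by
    intro n
    induction n with
    | zero =>
      intro cs hcs s
      have : cs = [] := List.length_eq_zero_iff.mp (Nat.le_zero.mp hcs)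
      subst this
      simp [pvSplitNL, pvLinesA, pvProcA, pvRunA, PySem.Chars.join_singleton]
    | succ n ih =>
      intro cs hcs s
      by_cases hnl : '\n' ∈ cs
      · obtain ⟨l, r, hlr, hl⟩ : ∃ l r, cs = l ++ '\n' :: r ∧ '\n' ∉ l := by
          obtain ⟨l, r, h⟩ := List.eq_append_cons_of_mem hnl
          exact ⟨l, r, h.1, h.2⟩
        subst hlr
        rw [pvSplitNL_append l r hl]
        simp only [pvLinesA]
        rcases hsp : pvSplitNL r with _ | ⟨hd, tl⟩
        · exact absurd hsp (pvSplitNL_ne_nil r)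
        · simp only [pvLinesA]
          rw [PySem.Chars.join_cons_cons]
          have hr : r.length ≤ n := by
            simp only [List.length_append, List.length_cons] at hcs
            omega
          have hih := ih r hr (pvProcA s false l).2
          rw [hsp] at hih
          simp only [pvLinesA] at hih
          rw [hih, pvRunA_line l s false r hl]
          simp
      · rw [pvSplitNL_no_nl cs hnl]
        simp only [pvLinesA, PySem.Chars.join_singleton]
        exact (pvRunA_no_nl cs s false hnl).symm
  intro s
  exact H cs.length cs le_rfl s

-- ===== B side =====

def pvBFinish (st : List Char × Bool × Bool × Bool × Option Char) : List Char :=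
  st.1 ++ (if st.2.2.2.1 then ['/'] else [])

-- the one flat induction relating B's fold to the reference pass, in all three live states
theorem pvB_run (cs : List Char) :
    (∀ (out : List Char) (s : Bool) (prev : Option Char),
      pvBFinish (cs.foldl pvBStep (out, s, false, false, prev)) =
        out ++ pvRunA s (decide (prev = some '\\')) cs) ∧
    (∀ (out : List Char),
      pvBFinish (cs.foldl pvBStep (out, false, false, true, some '/')) =
        out ++ pvRunA false false ('/' :: cs)) ∧
    (∀ (out : List Char) (s : Bool) (prev : Option Char),
      pvBFinish (cs.foldl pvBStep (out, s, true, false, prev)) =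
        out ++ pvRunA s false (cs.dropWhile (· ≠ '\n'))) := by
  induction cs with
  | nil =>
    refine ⟨?_, ?_, ?_⟩
    · intro out s prev; simp [pvBFinish, pvRunA]
    · intro out; simp [pvBFinish, pvRunA]
    · intro out s prev; simp [pvBFinish, pvRunA]
  | cons c rest ih =>
    obtain ⟨iha, ihb, ihc⟩ := ih
    refine ⟨?_, ?_, ?_⟩
    · -- normal state (not in comment, no pending slash)
      intro out s prev
      simp only [List.foldl_cons, pvBStep]
      by_cases hn : c = '\n'
      · subst hn
        rw [if_pos rfl, iha]
        simp [pvRunA]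
      · rw [if_neg hn]
        simp only [Bool.false_eq_true, if_false, if_neg (by simp : ¬ (false = true))]
        by_cases hq : c = '"' ∧ prev ≠ some '\\'
        · rw [if_pos hq, iha]
          have hc2 : c ≠ '\\' := by rw [hq.1]; decide
          simp [pvRunA, hn, hq.1, hq.2, hc2]
        · rw [if_neg hq]
          by_cases hs : s = false ∧ c = '/'
          · rw [if_pos hs]
            obtain ⟨hs1, hs2⟩ := hs
            subst hs1; subst hs2
            rw [ihb]
            simp [pvRunA]
          · rw [if_neg hs, iha]
            by_cases hcq : c = '"'
            · -- then prev = some '\\' (hq failed)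
              have hprev : prev = some '\\' := by
                by_contra hp
                exact hq ⟨hcq, hp⟩
              subst hcq; subst hprev
              simp [pvRunA, hn]
            · by_cases hcs : c = '/'
              · -- then s = true
                have hst : s = true := by
                  cases s with
                  | false => exact absurd ⟨rfl, hcs⟩ hs
                  | true => rfl
                subst hcs; subst hst
                simp [pvRunA]
              · simp [pvRunA, hn, hcq, hcs]
    · -- pending-slash state (in_string = false, not in comment, prev = '/')
      intro out
      by_cases hn : c = '\n'
      · subst hn
        simp only [List.foldl_cons]
        simp [pvBStep]
        rw [iha]
        simp [pvRunA]
      · by_cases hq : c = '"'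
        · subst hq
          simp only [List.foldl_cons]
          simp [pvBStep]
          rw [iha]
          simp [pvRunA]
        · by_cases hc : c = '/'
          · subst hc
            simp only [List.foldl_cons]
            simp [pvBStep]
            rw [ihc]
            simp [pvRunA, List.dropWhile_cons]
          · simp only [List.foldl_cons]
            simp [pvBStep, hn, hq, hc]
            rw [iha]
            simp [pvRunA, hn, hq, hc]
    · -- in-comment state
      intro out s prev
      by_cases hn : c = '\n'
      · subst hn
        simp only [List.foldl_cons]
        simp [pvBStep]
        rw [iha]
        simp [pvRunA, List.dropWhile_cons]
      · simp only [List.foldl_cons]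
        simp [pvBStep, hn]
        rw [ihc]
        simp [List.dropWhile_cons, hn]

-- ===== VERDICT (by name: the statement is the Claim_ definition above) =====
theorem remove_single_line_comments_py_spec : Claim_equal_remove_single_line_comments_py := by
  intro content _
  show remove_single_line_comments_py content = remove_single_line_comments_py_alt content
  unfold remove_single_line_comments_py remove_single_line_comments_py_alt
  simp only [pvSplitOn_eq]
  have hA := pvFoldA_eq (pvSplitNL content.toList) [] false
  have hB := (pvB_run content.toList).1 [] false none
  simp only [List.nil_append] at hA hB
  rw [hA, pvJoin_linesA content.toList false]
  have : pvBFinish (content.toList.foldl pvBStep ([], false, false, false, none)) =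
      (content.toList.foldl pvBStep ([], false, false, false, none)).1 ++
        (if (content.toList.foldl pvBStep ([], false, false, false, none)).2.2.2.1 then ['/'] else []) := rfl
  rw [← this, hB]
  simp
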